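-- pv_equiv track=rewrite | github.com/gahyoenj/baekjoon | 프로그래머스/1/159994. 카드 뭉치/카드 뭉치.py | solution
-- ===== SOURCE A (Python) =====
-- def solution(cards1, cards2, goal):
--     answer = ''
--     can = True
--     for word in goal:
--         if cards1 and word == cards1[0]:
--             cards1.pop(0)
--         elif cards2 and word == cards2[0]:
--             cards2.pop(0)
--         else:
--             can = False
--             break
--
--     if can:
--         answer = 'Yes'
--     else:
--         answer = 'No'
--     return answer
-- ===== SOURCE B (Python) =====
-- def step(cards1, cards2, state, word):
--     # state machine transition: None is the absorbing failure state,
--     # otherwise (i, j) are how many cards were consumed from each deck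
--     if state is None:
--         return None
--     i, j = state
--     if i < len(cards1) and cards1[i] == word:
--         return (i + 1, j)
--     if j < len(cards2) and cards2[j] == word:
--         return (i, j + 1)
--     return None
--
-- def solution(cards1, cards2, goal):
--     # Fold goal through an Option-style state machine over index pointers;
--     # no list mutation (A pops from cards1/cards2 in place), no break.
--     state = (0, 0)
--     for word in goal:
--         state = step(cards1, cards2, state, word)
--     return 'No' if state is None else 'Yes'
-- ===== Notes on version B (the rewrite author's own statement) =====
-- stated objective: alternative
-- what changed: Replaces A's in-place pop(0) consumption with early break by a total fold of goal through an Option-style state machine carrying two index pointers into the unchanged lists (absorbing None failure state); B does not mutate its arguments.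
import Mathlib
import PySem

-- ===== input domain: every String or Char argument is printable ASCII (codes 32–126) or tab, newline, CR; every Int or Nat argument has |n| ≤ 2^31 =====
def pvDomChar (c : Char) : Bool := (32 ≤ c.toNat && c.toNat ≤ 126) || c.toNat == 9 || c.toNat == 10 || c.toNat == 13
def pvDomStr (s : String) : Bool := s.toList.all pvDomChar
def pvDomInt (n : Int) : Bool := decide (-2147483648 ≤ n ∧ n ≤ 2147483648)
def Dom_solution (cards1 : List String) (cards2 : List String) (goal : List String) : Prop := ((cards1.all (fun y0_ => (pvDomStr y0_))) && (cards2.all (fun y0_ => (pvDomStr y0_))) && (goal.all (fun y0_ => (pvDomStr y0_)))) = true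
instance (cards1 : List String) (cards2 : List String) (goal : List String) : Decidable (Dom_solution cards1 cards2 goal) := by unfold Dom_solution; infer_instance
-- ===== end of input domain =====

-- B replaces A's pop(0) consumption with early break by a total fold of goal through an
-- Option state machine over two index pointers; equivalence is about the RETURN
-- value only: A mutates cards1/cards2 in place, B does not.

-- ===== PORT A =====
-- the for-loop over goal: cards1/cards2 are the mutable lists, popped from the front
def solutionLoop (cards1 : List String) (cards2 : List String) : List String → Bool
  | [] => true
  | word :: rest =>
    if cards1 ≠ [] ∧ cards1.head? = some word then
      solutionLoop cards1.tail cards2 rest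
    else if cards2 ≠ [] ∧ cards2.head? = some word then
      solutionLoop cards1 cards2.tail rest
    else
      false

def solution (cards1 : List String) (cards2 : List String) (goal : List String) : String :=
  if solutionLoop cards1 cards2 goal then "Yes" else "No"

-- ===== PORT B =====
-- state-machine transition: none is the absorbing failure state, some (i, j) counts
-- how many cards were consumed from each deck
def solutionAltStep (cards1 : List String) (cards2 : List String)
    (state : Option (Nat × Nat)) (word : String) : Option (Nat × Nat) :=
  match state with
  | none => none
  | some (i, j) =>
    if i < cards1.length ∧ cards1[i]? = some word then some (i + 1, j)
    else if j < cards2.length ∧ cards2[j]? = some word then some (i, j + 1)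
    else none

def solution_alt (cards1 : List String) (cards2 : List String) (goal : List String) : String :=
  match goal.foldl (solutionAltStep cards1 cards2) (some (0, 0)) with
  | none => "No"
  | some _ => "Yes"

-- ===== PRECONDITION & SPEC =====
def Spec_solution (cards1 : List String) (cards2 : List String) (goal : List String) (out : String) : Prop := out = solution_alt cards1 cards2 goal
instance (cards1 : List String) (cards2 : List String) (goal : List String) (out : String) : Decidable (Spec_solution cards1 cards2 goal out) := by unfold Spec_solution; infer_instance

-- ===== CLAIM (what is proved, stated in full; the proofs are below) =====
def Claim_equal_solution : Prop := ∀ (cards1 : List String) (cards2 : List String) (goal : List String), Dom_solution cards1 cards2 goal → Spec_solution cards1 cards2 goal (solution cards1 cards2 goal)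

-- ===== LEMMAS AND PROOFS =====

theorem foldl_step_none (cards1 cards2 : List String) (goal : List String) :
    goal.foldl (solutionAltStep cards1 cards2) none = none := by
  induction goal with
  | nil => rfl
  | cons w rest ih => simpa [solutionAltStep] using ih

theorem idx_iff_head (cards : List String) (i : Nat) (word : String) :
    (i < cards.length ∧ cards[i]? = some word)
      ↔ (cards.drop i ≠ [] ∧ (cards.drop i).head? = some word) := by
  rw [List.head?_drop]
  constructor
  · rintro ⟨hi, hg⟩
    exact ⟨by simpa [List.drop_eq_nil_iff] using Nat.not_le.mpr hi, hg⟩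
  · rintro ⟨hne, hg⟩
    refine ⟨?_, hg⟩
    by_contra h
    rw [List.getElem?_eq_none (by omega)] at hg
    simp at hg

theorem foldl_eq_loop (cards1 cards2 : List String) (goal : List String) :
    ∀ i j, (goal.foldl (solutionAltStep cards1 cards2) (some (i, j))).isSome
      = solutionLoop (cards1.drop i) (cards2.drop j) goal := by
  induction goal with
  | nil => intro i j; rfl
  | cons word rest ih =>
    intro i j
    simp only [List.foldl_cons, solutionLoop, solutionAltStep]
    by_cases hc1 : i < cards1.length ∧ cards1[i]? = some word
    · rw [if_pos hc1, if_pos ((idx_iff_head cards1 i word).mp hc1), ih,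
        ← List.drop_drop, List.drop_one, List.tail_drop]
    · rw [if_neg hc1, if_neg (fun h => hc1 ((idx_iff_head cards1 i word).mpr h))]
      by_cases hc2 : j < cards2.length ∧ cards2[j]? = some word
      · rw [if_pos hc2, if_pos ((idx_iff_head cards2 j word).mp hc2), ih,
          ← List.drop_drop, List.drop_one, List.tail_drop]
      · rw [if_neg hc2, if_neg (fun h => hc2 ((idx_iff_head cards2 j word).mpr h)),
          foldl_step_none]
        rfl

-- ===== VERDICT (by name: the statement is the Claim_ definition above) =====
theorem solution_spec : Claim_equal_solution := by
  intro cards1 cards2 goal _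
  show solution cards1 cards2 goal = solution_alt cards1 cards2 goal
  unfold solution solution_alt
  have h := foldl_eq_loop cards1 cards2 goal 0 0
  simp only [List.drop_zero] at h
  rcases hfold : goal.foldl (solutionAltStep cards1 cards2) (some (0, 0)) with _ | st <;>
    rw [hfold] at h <;> simp at h <;> simp [← h]
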